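-- pv_equiv track=rewrite | github.com/zybmax/adventofcode | problems_2021/day23/solution_part2.py | _move_is_blocked
-- ===== SOURCE A (Python) =====
-- from typing import Set
-- from typing import Tuple
--
-- _Position = Tuple[int, int]
--
-- _HALLWAY_VALID_X_POSITIONS = {0, 1, 3, 5, 7, 9, 10}
--
-- def _move_is_blocked(
--     all_amphipod_positions: Set[_Position], start_position: _Position, end_position: _Position
-- ) -> bool:
--     other_amphipod_positions = all_amphipod_positions - {start_position}
--     # The end position must not be occupied no matter what.
--     if end_position in other_amphipod_positions:
--         return True
--
--     # Reorder start_position and end_position so that end_position is always in a room.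
--     if end_position[0] == 0:
--         start_position, end_position = end_position, start_position
--     # If moving out from or into the deeper space in the room, then the shallower part of the room must not be occupied.
--     for shallower_y in range(end_position[0] - 1, 0, -1):
--         if (shallower_y, end_position[1]) in other_amphipod_positions:
--             return True
--
--     # Make sure that the hallway is not blocked for the move.
--     hallway_valid_positions_on_path = set(
--         (0, i)
--         for i in range(min(start_position[1], end_position[1]), max(start_position[1], end_position[1]) + 1)
--         if i in _HALLWAY_VALID_X_POSITIONS
--     )
--     if len(hallway_valid_positions_on_path.intersection(other_amphipod_positions)) > 0:
--         return True
--
--     # No hallway blockage and no room blockage, the move is not blocked.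
--     return False
-- ===== SOURCE B (Python) =====
-- def _move_is_blocked(all_amphipod_positions, start_position, end_position):
--     # One pass over the other amphipods; each is tested against a closed-form
--     # arithmetic blocking predicate (no path cells are enumerated, no sets built).
--     room = start_position if end_position[0] == 0 else end_position
--     lo = min(start_position[1], end_position[1])
--     hi = max(start_position[1], end_position[1])
--
--     def blocks(p):
--         y, x = p
--         if p == end_position:
--             return True
--         if x == room[1] and 1 <= y <= room[0] - 1:
--             return True
--         return (y == 0 and lo <= x <= hi
--                 and (x == 0 or x == 10 or (1 <= x <= 9 and x % 2 == 1)))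
--
--     return any(p != start_position and blocks(p) for p in all_amphipod_positions)
-- ===== Notes on version B (the rewrite author's own statement) =====
-- stated objective: alternative
-- what changed: Instead of enumerating path cells (shallower room cells, valid hallway cells) into sets and intersecting with the occupied set, B makes a single pass over the amphipods and tests each against a closed-form arithmetic blocking predicate (column/interval/parity inequalities); no sets or ranges are materialised.
import Mathlib
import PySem

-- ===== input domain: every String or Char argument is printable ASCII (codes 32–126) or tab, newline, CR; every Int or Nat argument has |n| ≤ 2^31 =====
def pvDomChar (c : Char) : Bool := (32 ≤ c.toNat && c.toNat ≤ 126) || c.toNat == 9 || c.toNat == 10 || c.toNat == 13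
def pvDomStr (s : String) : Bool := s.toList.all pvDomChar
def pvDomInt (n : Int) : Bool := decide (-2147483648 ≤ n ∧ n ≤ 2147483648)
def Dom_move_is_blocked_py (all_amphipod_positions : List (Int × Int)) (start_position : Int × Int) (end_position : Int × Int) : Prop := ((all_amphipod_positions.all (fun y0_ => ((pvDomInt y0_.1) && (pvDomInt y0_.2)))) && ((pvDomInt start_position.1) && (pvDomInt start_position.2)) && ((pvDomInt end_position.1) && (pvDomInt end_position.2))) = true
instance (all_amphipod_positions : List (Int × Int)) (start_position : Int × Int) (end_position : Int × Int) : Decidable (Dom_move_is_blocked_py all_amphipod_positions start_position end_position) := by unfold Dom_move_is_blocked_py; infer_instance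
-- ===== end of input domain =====

-- B replaces A's enumerated path-cell sets (room cells, valid hallway cells) with a
-- single pass over the amphipods testing a closed-form arithmetic blocking predicate.


def hallwayValidX : List Int := [0, 1, 3, 5, 7, 9, 10]

-- ===== PORT A =====
def move_is_blocked_py (all_amphipod_positions : List (Int × Int)) (start_position : Int × Int) (end_position : Int × Int) : Bool :=
  let other_amphipod_positions := PySem.Set.diff all_amphipod_positions [start_position]
  -- The end position must not be occupied no matter what.
  if PySem.Set.contains other_amphipod_positions end_position then true
  else
    -- Reorder start_position and end_position so that end_position is always in a room.
    let sw := if end_position.1 = 0 then (end_position, start_position) else (start_position, end_position)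
    let start_position := sw.1
    let end_position := sw.2
    -- Shallower part of the room must not be occupied (for-loop with early return True).
    if (PySem.List.pyRange (end_position.1 - 1) 0 (-1)).any
        (fun shallower_y => PySem.Set.contains other_amphipod_positions (shallower_y, end_position.2)) then true
    else
      -- Hallway must not be blocked for the move.
      let hallway_valid_positions_on_path : PySem.Set (Int × Int) :=
        PySem.Set.ofList
          (((PySem.List.pyRange (min start_position.2 end_position.2) (max start_position.2 end_position.2 + 1) 1).filter
              (fun i => PySem.Set.contains hallwayValidX i)).map (fun i => ((0 : Int), i)))
      if PySem.Set.len (PySem.Set.inter hallway_valid_positions_on_path other_amphipod_positions) > 0 then true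
      else false

-- ===== PORT B =====
def move_is_blocked_py_alt (all_amphipod_positions : List (Int × Int)) (start_position : Int × Int) (end_position : Int × Int) : Bool :=
  let room := if end_position.1 = 0 then start_position else end_position
  let lo := min start_position.2 end_position.2
  let hi := max start_position.2 end_position.2
  -- blocks p: closed-form arithmetic predicate (no path cells enumerated)
  let blocks : Int × Int → Bool := fun p =>
    decide (p = end_position) ||
    (decide (p.2 = room.2) && decide (1 ≤ p.1) && decide (p.1 ≤ room.1 - 1)) ||
    (decide (p.1 = 0) && decide (lo ≤ p.2) && decide (p.2 ≤ hi) &&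
      (decide (p.2 = 0) || decide (p.2 = 10) ||
       (decide (1 ≤ p.2) && decide (p.2 ≤ 9) && decide (p.2 % 2 = 1))))
  all_amphipod_positions.any (fun p => decide (p ≠ start_position) && blocks p)

-- ===== PRECONDITION & SPEC =====
def Spec_move_is_blocked_py (all_amphipod_positions : List (Int × Int)) (start_position : Int × Int) (end_position : Int × Int) (out : Bool) : Prop := out = move_is_blocked_py_alt all_amphipod_positions start_position end_position
instance (all_amphipod_positions : List (Int × Int)) (start_position : Int × Int) (end_position : Int × Int) (out : Bool) : Decidable (Spec_move_is_blocked_py all_amphipod_positions start_position end_position out) := by unfold Spec_move_is_blocked_py; infer_instance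

-- ===== CLAIM (what is proved, stated in full; the proofs are below) =====
def Claim_equal_move_is_blocked_py : Prop := ∀ (all_amphipod_positions : List (Int × Int)) (start_position : Int × Int) (end_position : Int × Int), Dom_move_is_blocked_py all_amphipod_positions start_position end_position → Spec_move_is_blocked_py all_amphipod_positions start_position end_position (move_is_blocked_py all_amphipod_positions start_position end_position)

-- ===== LEMMAS AND PROOFS =====

theorem len_pos_iff_exists {a : Type} (l : List a) : ((l.length : Int) > 0) ↔ ∃ x, x ∈ l := by
  cases l <;> simp

theorem hallway_mem (x : Int) :
    x ∈ hallwayValidX ↔ (x = 0 ∨ x = 10 ∨ (1 ≤ x ∧ x ≤ 9 ∧ x % 2 = 1)) := by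
  simp [hallwayValidX]; omega

theorem move_is_blocked_eq (all_amphipod_positions : List (Int × Int))
    (start_position : Int × Int) (end_position : Int × Int) :
    move_is_blocked_py all_amphipod_positions start_position end_position =
      move_is_blocked_py_alt all_amphipod_positions start_position end_position := by
  rw [Bool.eq_iff_iff]
  unfold move_is_blocked_py move_is_blocked_py_alt
  by_cases h : end_position.1 = 0 <;>
    simp only [h, if_pos, if_neg, not_false_iff] <;>
    simp only [PySem.Set.len, PySem.Set.contains_iff, Bool.ite_eq_true_distrib,
      List.any_eq_true, ne_eq, Bool.and_eq_true, Bool.or_eq_true, decide_eq_true_eq] <;>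
    simp only [len_pos_iff_exists, PySem.Set.mem_inter, PySem.Set.mem_diff,
      PySem.Set.mem_ofList, List.mem_map, List.mem_filter,
      PySem.List.mem_pyRange_neg_one, PySem.List.mem_pyRange_one,
      PySem.Set.contains_iff, hallway_mem,
      List.mem_cons, List.not_mem_nil, or_false,
      min_comm, max_comm, if_true_left, Bool.false_eq_true,
      ← or_iff_not_imp_left] <;>
    obtain ⟨s1, s2⟩ := start_position <;>
    obtain ⟨e1, e2⟩ := end_position <;>
    constructor
  · rintro (⟨hmem, hne⟩ | ⟨y, hy, hmem, hne⟩ | ⟨x, ⟨a, ⟨⟨hla, hah⟩, har⟩, rfl⟩, hmem, hne⟩)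
    · exact ⟨_, hmem, hne, Or.inl (Or.inl rfl)⟩
    · exact ⟨_, hmem, hne, Or.inl (Or.inr ⟨⟨rfl, by omega⟩, by omega⟩)⟩
    · exact ⟨_, hmem, hne, Or.inr ⟨⟨⟨rfl, hla⟩, by omega⟩, by tauto⟩⟩
  · rintro ⟨⟨p1, p2⟩, hmem, hne, (heq | ⟨⟨hc, h1⟩, h2⟩) | ⟨⟨⟨h0, hl⟩, hh⟩, har⟩⟩
    · exact Or.inl ⟨heq ▸ hmem, heq ▸ hne⟩
    · replace hc : p2 = _ := hc
      subst hc
      exact Or.inr (Or.inl ⟨p1, ⟨by omega, h2⟩, hmem, hne⟩)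
    · replace h0 : p1 = 0 := h0
      subst h0
      exact Or.inr (Or.inr ⟨(0, p2), ⟨p2, ⟨⟨hl, by omega⟩, by tauto⟩, rfl⟩, hmem, hne⟩)
  · rintro (⟨hmem, hne⟩ | ⟨y, hy, hmem, hne⟩ | ⟨x, ⟨a, ⟨⟨hla, hah⟩, har⟩, rfl⟩, hmem, hne⟩)
    · exact ⟨_, hmem, hne, Or.inl (Or.inl rfl)⟩
    · exact ⟨_, hmem, hne, Or.inl (Or.inr ⟨⟨rfl, by omega⟩, by omega⟩)⟩
    · exact ⟨_, hmem, hne, Or.inr ⟨⟨⟨rfl, hla⟩, by omega⟩, by tauto⟩⟩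
  · rintro ⟨⟨p1, p2⟩, hmem, hne, (heq | ⟨⟨hc, h1⟩, h2⟩) | ⟨⟨⟨h0, hl⟩, hh⟩, har⟩⟩
    · exact Or.inl ⟨heq ▸ hmem, heq ▸ hne⟩
    · replace hc : p2 = _ := hc
      subst hc
      exact Or.inr (Or.inl ⟨p1, ⟨by omega, h2⟩, hmem, hne⟩)
    · replace h0 : p1 = 0 := h0
      subst h0
      exact Or.inr (Or.inr ⟨(0, p2), ⟨p2, ⟨⟨hl, by omega⟩, by tauto⟩, rfl⟩, hmem, hne⟩)

-- ===== VERDICT (by name: the statement is the Claim_ definition above) =====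
theorem move_is_blocked_py_spec : Claim_equal_move_is_blocked_py := by
  unfold Claim_equal_move_is_blocked_py Spec_move_is_blocked_py
  intro a s e _
  exact move_is_blocked_eq a s e
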